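-- pv_equiv track=rewrite | github.com/DanilT-20/AGE | егкр-14-03-25/task-23-11240.py | f
-- ===== SOURCE A (Python) =====
-- def f(num, end, a=False):
--     if num == end:
--         return 1
--     if num > end:
--         return 0
--     if a:
--         return f(num+2, end) + f(num*3,end)
--     return f(num+2, end)+ f(num**2, end, True)+f(num*3,end)
-- ===== SOURCE B (Python) =====
-- def f(num, end, a=False):
--     memo = {}
--
--     def go(n, flag):
--         if n == end:
--             return 1
--         if n > end:
--             return 0
--         key = (n, flag)
--         if key in memo:
--             return memo[key]
--         if flag:
--             r = go(n + 2, False) + go(n * 3, False)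
--         else:
--             r = go(n + 2, False) + go(n * n, True) + go(n * 3, False)
--         memo[key] = r
--         return r
--
--     return go(num, a)
-- ===== Notes on version B (the rewrite author's own statement) =====
-- stated objective: faster
-- what changed: Replaces the naive exponential triple recursion by a memoized search keyed on the (value, flag) state, so each reachable state is evaluated once.
import Mathlib
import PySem

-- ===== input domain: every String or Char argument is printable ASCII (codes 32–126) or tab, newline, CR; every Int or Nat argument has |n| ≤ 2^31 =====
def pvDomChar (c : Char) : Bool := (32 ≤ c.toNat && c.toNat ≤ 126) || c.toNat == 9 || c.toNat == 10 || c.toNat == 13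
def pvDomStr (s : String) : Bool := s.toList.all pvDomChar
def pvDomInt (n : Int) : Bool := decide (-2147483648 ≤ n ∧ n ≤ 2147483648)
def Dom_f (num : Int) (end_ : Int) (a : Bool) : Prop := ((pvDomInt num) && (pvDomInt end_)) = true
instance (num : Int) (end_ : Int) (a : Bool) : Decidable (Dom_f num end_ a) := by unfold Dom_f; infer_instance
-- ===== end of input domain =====

-- B replaces A's naive triple recursion by a memoized search keyed on the (value, flag) state.
-- Both ports use fuel only as a totality guard (the fuel suffices on every input admitted by Pre_f;
-- on num ≤ 0 < end, outside Pre_f, the Python recursions never return — RecursionError).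

-- ===== PORT A =====
def fGo (end_ : Int) (fuel : Nat) (num : Int) (a : Bool) : Int :=
  match fuel with
  | 0 => 0  -- fuel exhausted: unreachable under Pre_f
  | fuel + 1 =>
    if num = end_ then 1
    else if num > end_ then 0
    else if a then fGo end_ fuel (num + 2) false + fGo end_ fuel (num * 3) false
    else fGo end_ fuel (num + 2) false + fGo end_ fuel (num ^ 2) true + fGo end_ fuel (num * 3) false

def f (num : Int) (end_ : Int) (a : Bool) : Int :=
  fGo end_ ((2 * (end_ - num)).toNat + 2) num a

-- ===== PORT B =====
def fAltGo (end_ : Int) (fuel : Nat) (n : Int) (flag : Bool)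
    (memo : PySem.Dict (Int × Bool) Int) : Int × PySem.Dict (Int × Bool) Int :=
  match fuel with
  | 0 => (0, memo)  -- fuel exhausted: unreachable under Pre_f
  | fuel + 1 =>
    if n = end_ then (1, memo)
    else if n > end_ then (0, memo)
    else
      match memo.get? (n, flag) with
      | some v => (v, memo)
      | none =>
        if flag then
          let p1 := fAltGo end_ fuel (n + 2) false memo
          let p2 := fAltGo end_ fuel (n * 3) false p1.2
          let r := p1.1 + p2.1
          (r, p2.2.insert (n, flag) r)
        else
          let p1 := fAltGo end_ fuel (n + 2) false memo
          let p2 := fAltGo end_ fuel (n * n) true p1.2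
          let p3 := fAltGo end_ fuel (n * 3) false p2.2
          let r := p1.1 + p2.1 + p3.1
          (r, p3.2.insert (n, flag) r)

def f_alt (num : Int) (end_ : Int) (a : Bool) : Int :=
  (fAltGo end_ ((2 * (end_ - num)).toNat + 2) num a PySem.Dict.empty).1

-- ===== PRECONDITION & SPEC =====
-- Pre_f excludes exactly the inputs (num ≤ 0 and num < end) on which Python A recurses forever and
-- raises RecursionError; A returns normally on every other input.
def Pre_f (num : Int) (end_ : Int) (a : Bool) : Prop := 1 ≤ num ∨ end_ ≤ num
instance (num : Int) (end_ : Int) (a : Bool) : Decidable (Pre_f num end_ a) := by unfold Pre_f; infer_instance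
def pvWitness_f : Int × Int × Bool := (1, 9, false)

def Spec_f (num : Int) (end_ : Int) (a : Bool) (out : Int) : Prop := out = f_alt num end_ a
instance (num : Int) (end_ : Int) (a : Bool) (out : Int) : Decidable (Spec_f num end_ a out) := by unfold Spec_f; infer_instance

-- ===== CLAIM (what is proved, stated in full; the proofs are below) =====
def Claim_equal_f : Prop := ∀ (num : Int) (end_ : Int) (a : Bool), Dom_f num end_ a → Pre_f num end_ a → Spec_f num end_ a (f num end_ a)

-- ===== LEMMAS AND PROOFS =====

-- the decrease measure of the Python recursions (proof-only)
def mu (end_ n : Int) (b : Bool) : Nat := (2 * (end_ - n)).toNat + (if b then 0 else 1)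

theorem pvMulSelfGe (n : Int) (h : 0 < n) : n ≤ n * n := le_mul_of_one_le_left h.le h

theorem mu_add2 (e n : Int) (b : Bool) (hne : ¬n = e) (hgt : ¬n > e) :
    mu e (n + 2) false < mu e n b := by
  cases b <;> simp only [mu, if_pos, if_neg, Bool.false_eq_true, ite_true, ite_false] <;> omega

theorem mu_mul3 (e n : Int) (b : Bool) (hne : ¬n = e) (hgt : ¬n > e) (hpos : 1 ≤ n) :
    mu e (n * 3) false < mu e n b := by
  cases b <;> simp only [mu, if_pos, if_neg, Bool.false_eq_true, ite_true, ite_false] <;> omega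

theorem mu_sq (e n s : Int) (hs : n ≤ s) (hne : ¬n = e) (hgt : ¬n > e) :
    mu e s true < mu e n false := by
  simp only [mu, Bool.false_eq_true, ite_true, ite_false]
  omega

-- the value of A's recursion does not depend on the fuel, as long as the fuel exceeds the measure
theorem fGo_fuel_irrel (e : Int) : ∀ (f1 f2 : Nat) (n : Int) (b : Bool),
    mu e n b < f1 → mu e n b < f2 → 1 ≤ n → fGo e f1 n b = fGo e f2 n b := by
  intro f1
  induction f1 with
  | zero => exact fun f2 n b h1 _ _ => absurd h1 (Nat.not_lt_zero _)
  | succ k ih =>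
    intro f2 n b h1 h2 hn
    cases f2 with
    | zero => exact absurd h2 (Nat.not_lt_zero _)
    | succ m =>
      rw [fGo, fGo]
      by_cases he : n = e
      · simp [he]
      · by_cases hgt : n > e
        · simp [he, hgt]
        · have hk : mu e n b ≤ k := by omega
          have hm : mu e n b ≤ m := by omega
          have hsq : n ≤ n ^ 2 := by rw [sq]; exact pvMulSelfGe n (by omega)
          simp only [he, hgt, if_neg, not_false_iff, ite_false]
          cases b with
          | true =>
            simp only [ite_true]
            rw [ih m (n + 2) false (by have := mu_add2 e n true he hgt; omega)
                  (by have := mu_add2 e n true he hgt; omega) (by omega),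
                ih m (n * 3) false (by have := mu_mul3 e n true he hgt hn; omega)
                  (by have := mu_mul3 e n true he hgt hn; omega) (by omega)]
          | false =>
            simp only [Bool.false_eq_true, ite_false]
            rw [ih m (n + 2) false (by have := mu_add2 e n false he hgt; omega)
                  (by have := mu_add2 e n false he hgt; omega) (by omega),
                ih m (n ^ 2) true (by have := mu_sq e n (n ^ 2) hsq he hgt; omega)
                  (by have := mu_sq e n (n ^ 2) hsq he hgt; omega) (by nlinarith),
                ih m (n * 3) false (by have := mu_mul3 e n false he hgt hn; omega)
                  (by have := mu_mul3 e n false he hgt hn; omega) (by omega)]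

-- the memo invariant: every stored entry is A's value for its state (for every sufficient fuel)
def MemoGood (e : Int) (memo : PySem.Dict (Int × Bool) Int) : Prop :=
  ∀ (k : Int × Bool) (v : Int), memo.get? k = some v →
    1 ≤ k.1 ∧ ∀ fl : Nat, mu e k.1 k.2 < fl → v = fGo e fl k.1 k.2

theorem memoGood_empty (e : Int) : MemoGood e PySem.Dict.empty := by
  intro k v h
  simp [PySem.Dict.get?_empty] at h

theorem memoGood_insert (e : Int) (memo : PySem.Dict (Int × Bool) Int)
    (h : MemoGood e memo) (k : Int × Bool) (v : Int) (hk : 1 ≤ k.1)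
    (hv : ∀ fl : Nat, mu e k.1 k.2 < fl → v = fGo e fl k.1 k.2) :
    MemoGood e (memo.insert k v) := by
  intro k' v' h'
  rcases eq_or_ne k' k with rfl | hne
  · rw [PySem.Dict.get?_insert_self] at h'
    cases h'
    exact ⟨hk, hv⟩
  · rw [PySem.Dict.get?_insert_of_ne memo v hne] at h'
    exact h k' v' h'

-- main invariant: with the SAME fuel on both sides and a good memo, B returns A's value and a good memo
theorem fAltGo_correct (e : Int) : ∀ (fuel : Nat) (n : Int) (b : Bool)
    (memo : PySem.Dict (Int × Bool) Int), mu e n b < fuel → 1 ≤ n → MemoGood e memo →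
    (fAltGo e fuel n b memo).1 = fGo e fuel n b ∧ MemoGood e (fAltGo e fuel n b memo).2 := by
  intro fuel
  induction fuel with
  | zero => exact fun n b memo h1 _ _ => absurd h1 (Nat.not_lt_zero _)
  | succ k ih =>
    intro n b memo hfu hn hgood
    rw [fAltGo, fGo]
    by_cases he : n = e
    · simp [he]; exact hgood
    · by_cases hgt : n > e
      · simp [he, hgt]; exact hgood
      · simp only [he, hgt, if_neg, not_false_iff, ite_false]
        cases hmem : memo.get? (n, b) with
        | some v =>
          obtain ⟨-, hv⟩ := hgood (n, b) v hmem
          have := hv (k + 1) hfu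
          rw [fGo] at this
          simp only [he, hgt, if_neg, not_false_iff, ite_false] at this
          exact ⟨by simpa using this, hgood⟩
        | none =>
          have hk : mu e n b ≤ k := by omega
          have hsqpos : (1 : Int) ≤ n * n := by nlinarith
          have hsq : n ≤ n * n := pvMulSelfGe n (by omega)
          cases b with
          | true =>
            have m1 := mu_add2 e n true he hgt
            have m2 := mu_mul3 e n true he hgt hn
            obtain ⟨e1, g1⟩ := ih (n + 2) false memo (by omega) (by omega) hgood
            obtain ⟨e2, g2⟩ := ih (n * 3) false _ (by omega) (by omega) g1
            simp only [ite_true]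
            refine ⟨by simp [e1, e2], ?_⟩
            apply memoGood_insert e _ g2 (n, true) _ hn
            intro fl hfl
            have hval : (fAltGo e k (n + 2) false memo).1 +
                (fAltGo e k (n * 3) false (fAltGo e k (n + 2) false memo).2).1
                = fGo e (k + 1) n true := by
              rw [fGo]
              simp only [he, hgt, if_neg, not_false_iff, ite_false, ite_true]
              rw [e1, e2]
            rw [hval]
            exact fGo_fuel_irrel e (k + 1) fl n true hfu hfl hn
          | false =>
            have m1 := mu_add2 e n false he hgt
            have m2 := mu_mul3 e n false he hgt hn
            have m3 := mu_sq e n (n * n) hsq he hgt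
            obtain ⟨e1, g1⟩ := ih (n + 2) false memo (by omega) (by omega) hgood
            obtain ⟨e2, g2⟩ := ih (n * n) true _ (by omega) hsqpos g1
            obtain ⟨e3, g3⟩ := ih (n * 3) false _ (by omega) (by omega) g2
            have hpow : n ^ 2 = n * n := sq n
            simp only [Bool.false_eq_true, ite_false]
            refine ⟨by simp [e1, e2, e3, hpow], ?_⟩
            apply memoGood_insert e _ g3 (n, false) _ hn
            intro fl hfl
            have hval : (fAltGo e k (n + 2) false memo).1 +
                (fAltGo e k (n * n) true (fAltGo e k (n + 2) false memo).2).1 +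
                (fAltGo e k (n * 3) false
                  (fAltGo e k (n * n) true (fAltGo e k (n + 2) false memo).2).2).1
                = fGo e (k + 1) n false := by
              rw [fGo]
              simp only [he, hgt, if_neg, not_false_iff, ite_false, Bool.false_eq_true, hpow]
              rw [e1, e2, e3]
            rw [hval]
            exact fGo_fuel_irrel e (k + 1) fl n false hfu hfl hn

-- ===== VERDICT (by name: the statement is the Claim_ definition above) =====
theorem f_spec : Claim_equal_f := by
  intro num end_ a _ hpre
  show f num end_ a = f_alt num end_ a
  unfold f f_alt
  by_cases hn : 1 ≤ num
  · have hfu : mu end_ num a < (2 * (end_ - num)).toNat + 2 := by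
      cases a <;> simp only [mu, Bool.false_eq_true, ite_true, ite_false] <;> omega
    exact ((fAltGo_correct end_ ((2 * (end_ - num)).toNat + 2) num a PySem.Dict.empty hfu hn
      (memoGood_empty end_)).1).symm
  · have hend : end_ ≤ num := by rcases hpre with h | h <;> omega
    rw [fGo, fAltGo]
    by_cases he : num = end_
    · simp [he]
    · have hgt : num > end_ := by omega
      simp [he, hgt]
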